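-- pv_equiv track=rewrite | github.com/ChangePlusPlusVandy/change-coding-challenge-SiwooBae | ThisSchoolHasntKickedMyAssYet.py | group_by_sentence
-- ===== SOURCE A (Python) =====
-- def group_by_sentence(corp):
--     sentence_stack = []
--     sentences = []
--     for line in corp:
--         sentence_stack.append(line)
--         if sentence_stack[-1][-1] == ".":  # if the last txt ended a sentence
--             sentences.append(" ".join(sentence_stack))
--             sentence_stack.clear()
--     return sentences
-- ===== SOURCE B (Python) =====
-- def group_by_sentence(corp):
--     corp = list(corp)
--     boundaries = [i for i, line in enumerate(corp) if line[-1] == "."]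
--     start = 0
--     sentences = []
--     for idx in boundaries:
--         sentences.append(" ".join(corp[start:idx + 1]))
--         start = idx + 1
--     return sentences
-- ===== Notes on version B (the rewrite author's own statement) =====
-- stated objective: alternative
-- what changed: B replaces A's running sentence_stack accumulator with a two-pass index/slice decomposition: first collect the indices of period-terminated lines, then emit each segment by slicing between consecutive boundaries and joining it.
import Mathlib
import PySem

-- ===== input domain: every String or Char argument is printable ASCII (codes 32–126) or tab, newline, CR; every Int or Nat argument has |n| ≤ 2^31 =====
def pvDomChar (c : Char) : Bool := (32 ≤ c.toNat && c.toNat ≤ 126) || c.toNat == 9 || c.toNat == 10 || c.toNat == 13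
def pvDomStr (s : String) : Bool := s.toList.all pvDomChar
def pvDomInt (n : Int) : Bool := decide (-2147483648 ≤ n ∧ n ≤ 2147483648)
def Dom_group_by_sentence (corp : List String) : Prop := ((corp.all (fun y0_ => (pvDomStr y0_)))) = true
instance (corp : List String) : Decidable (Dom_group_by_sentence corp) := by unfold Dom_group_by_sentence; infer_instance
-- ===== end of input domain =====

-- B replaces A's running accumulator with a two-pass boundary-index/slice decomposition (objective: alternative).

-- ===== PORT A =====
def group_by_sentence (corp : List String) : List String :=
  (corp.foldl
    (fun (st : List String × List String) line =>
      let stack := st.1 ++ [line]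
      if (PySem.List.pyGet? stack (-1)).bind (fun s => PySem.Str.pyGet? s (-1)) = some '.' then
        ([], st.2 ++ [PySem.Str.join " " stack])
      else
        (stack, st.2))
    ([], [])).2

-- ===== PORT B =====
def group_by_sentence_alt (corp : List String) : List String :=
  let boundaries : List Int := (PySem.List.enumerate corp 0).filterMap
    (fun p => if PySem.Str.pyGet? p.2 (-1) = some '.' then some p.1 else none)
  (boundaries.foldl
    (fun (st : Int × List String) idx =>
      (idx + 1, st.2 ++ [PySem.Str.join " " (PySem.List.slice corp (some st.1) (some (idx + 1)))]))
    (0, [])).2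

-- ===== PRECONDITION & SPEC =====
-- Pre_ excludes corpora containing an empty line: there Python A (and B) raise IndexError on line[-1].
def Pre_group_by_sentence (corp : List String) : Prop := ∀ s ∈ corp, s.toList ≠ []
instance (corp : List String) : Decidable (Pre_group_by_sentence corp) := by unfold Pre_group_by_sentence; infer_instance
def pvWitness_group_by_sentence : List String := ["hello", "world.", "bye."]
def Spec_group_by_sentence (corp : List String) (out : List String) : Prop := out = group_by_sentence_alt corp
instance (corp : List String) (out : List String) : Decidable (Spec_group_by_sentence corp out) := by unfold Spec_group_by_sentence; infer_instance

-- ===== CLAIM (what is proved, stated in full; the proofs are below) =====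
def Claim_equal_group_by_sentence : Prop := ∀ (corp : List String), Dom_group_by_sentence corp → Pre_group_by_sentence corp → Spec_group_by_sentence corp (group_by_sentence corp)

-- ===== LEMMAS AND PROOFS =====

def pvStepA (st : List String × List String) (line : String) : List String × List String :=
  let stack := st.1 ++ [line]
  if (PySem.List.pyGet? stack (-1)).bind (fun s => PySem.Str.pyGet? s (-1)) = some '.' then
    ([], st.2 ++ [PySem.Str.join " " stack])
  else
    (stack, st.2)

def pvStepB (corp : List String) (st : Int × List String) (idx : Int) : Int × List String :=
  (idx + 1, st.2 ++ [PySem.Str.join " " (PySem.List.slice corp (some st.1) (some (idx + 1)))])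

def pvBnds (xs : List String) (s : Int) : List Int :=
  (PySem.List.enumerate xs s).filterMap
    (fun p => if PySem.Str.pyGet? p.2 (-1) = some '.' then some p.1 else none)

lemma pvStepA_eq (stack sents : List String) (line : String) :
    pvStepA (stack, sents) line =
      if PySem.Str.pyGet? line (-1) = some '.' then
        ([], sents ++ [PySem.Str.join " " (stack ++ [line])])
      else
        (stack ++ [line], sents) := by
  simp [pvStepA, PySem.List.pyGet?_neg_one_append_singleton]

lemma groupA_eq (corp : List String) :
    group_by_sentence corp = (corp.foldl pvStepA ([], [])).2 := rfl

lemma groupB_eq (corp : List String) :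
    group_by_sentence_alt corp = ((pvBnds corp 0).foldl (pvStepB corp) (0, [])).2 := rfl

lemma pvKey : ∀ (xs done : List String) (n : Nat) (sents : List String), n ≤ done.length →
    (xs.foldl pvStepA (done.drop n, sents)).2 =
      ((pvBnds xs (done.length : Int)).foldl (pvStepB (done ++ xs)) ((n : Int), sents)).2 := by
  intro xs
  induction xs with
  | nil => intro done n sents h; simp [pvBnds, PySem.List.enumerate_nil]
  | cons x xs ih =>
    intro done n sents h
    rw [List.foldl_cons, pvStepA_eq]
    have hb : pvBnds (x :: xs) (done.length : Int)
        = (if PySem.Str.pyGet? x (-1) = some '.' then [(done.length : Int)] else [])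
          ++ pvBnds xs ((done.length : Int) + 1) := by
      simp only [pvBnds, PySem.List.enumerate_cons, List.filterMap_cons]
      split_ifs <;> simp_all [PySem.Str.pyGet?]
    by_cases hc : PySem.Str.pyGet? x (-1) = some '.'
    · rw [if_pos hc, hb, if_pos hc, List.singleton_append, List.foldl_cons]
      have hdrop : done.drop n ++ [x] =
          PySem.List.slice (done ++ x :: xs) (some (n : Int)) (some ((done.length : Int) + 1)) := by
        have : ((done.length : Int) + 1) = ((done.length + 1 : Nat) : Int) := by push_cast; ring
        rw [this, PySem.List.slice_natCast]
        rw [List.drop_append_of_le_length h]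
        have hcons : done.drop n ++ x :: xs = (done.drop n ++ [x]) ++ xs := by simp
        rw [hcons, List.take_append_of_le_length (by simp; omega)]
        rw [List.take_of_length_le (by simp; omega)]
      have h2 := ih (done ++ [x]) (done.length + 1) (sents ++ [PySem.Str.join " "
        (PySem.List.slice (done ++ x :: xs) (some (n : Int)) (some ((done.length : Int) + 1)))])
        (by simp)
      rw [show (done ++ [x]).drop (done.length + 1) = [] by simp,
          show (done ++ [x]).length = done.length + 1 by simp,
          show done ++ [x] ++ xs = done ++ x :: xs by simp,
          Nat.cast_add, Nat.cast_one] at h2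
      rw [hdrop]
      exact h2
    · rw [if_neg hc, hb, if_neg hc]
      have h2 := ih (done ++ [x]) n sents (by simp; omega)
      rw [show (done ++ [x]).drop n = done.drop n ++ [x] from List.drop_append_of_le_length h,
          show (done ++ [x]).length = done.length + 1 by simp,
          show done ++ [x] ++ xs = done ++ x :: xs by simp,
          Nat.cast_add, Nat.cast_one] at h2
      simpa using h2

-- ===== VERDICT (by name: the statement is the Claim_ definition above) =====
theorem group_by_sentence_spec : Claim_equal_group_by_sentence := by
  intro corp _ _
  unfold Spec_group_by_sentence
  rw [groupA_eq, groupB_eq]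
  simpa using pvKey corp [] 0 [] (by simp)
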